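-- pv_equiv track=rewrite | github.com/KIMJAEHEE0821/LQN_v2 | LQN_utils_state_parallel_sever.py | find_transformation
-- ===== SOURCE A (Python) =====
-- from itertools import combinations, permutations
-- from collections import Counter, defaultdict
--
-- def flip_bit_string(binary_str, n):
--     bit_list = list(binary_str)
--     bit_list[n] = '1' if bit_list[n] == '0' else '0'
--     return ''.join(bit_list) # list를 다시 bitstring으로 바꾸는거
--
-- def flip_multiple_bits(binary_str, positions):
--     for pos in positions:
--         binary_str = flip_bit_string(binary_str, pos)
--     return binary_str
--
-- def find_transformation(counter1, counter2):
--     bit_length = len(next(iter(counter1))) #그냥 counter에 있는 bit string길이 나타남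
--     for r in range(1, bit_length + 1):
--         for positions in combinations(range(bit_length), r): #이러면 (0,1,2,...bit_length-1)에서 r개 뽑는 경우의 수 다 뽑아냄. 즉 bit flip 어디할지 보여주는거.
--             flipped_data = Counter([flip_multiple_bits(bstr, positions) for bstr in counter1])
--             if flipped_data == counter2:
--                 return positions  # Return the positions of the bits that need to be flipped
--     return None  # Return None if no transformation is found
-- ===== SOURCE B (Python) =====
-- from collections import Counter
--
--
-- def find_transformation(counter1, counter2):
--     # A mask S maps the first key rep to flip(rep, S); if a transformation
--     # exists, flip(rep, S) must be a key of counter2, and S is then uniquely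
--     # determined by that key (flipping a character always changes it).  So
--     # instead of enumerating all 2^L masks, derive one candidate mask per key
--     # of counter2, verify the candidates in (size, lexicographic) order and
--     # return the first that works -- the same order in which the exhaustive
--     # search would have found it.
--     keys1 = list(counter1)
--     rep = keys1[0]
--     L = len(rep)
--
--     def flip(c):
--         return '1' if c == '0' else '0'
--
--     candidates = []
--     for t in counter2:
--         if len(t) != L:
--             continue
--         mask = tuple(i for i in range(L) if rep[i] != t[i])
--         if mask and all(flip(rep[i]) == t[i] for i in mask):
--             candidates.append(mask)
--     candidates.sort(key=lambda m: (len(m),) + m)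
--
--     for mask in candidates:
--         posset = set(mask)
--         flipped = Counter(
--             ''.join(flip(c) if i in posset else c for i, c in enumerate(k))
--             for k in keys1
--         )
--         if flipped == counter2:
--             return mask
--     return None
-- ===== Notes on version B (the rewrite author's own statement) =====
-- stated objective: faster
-- what changed: Instead of testing all 2^L - 1 bit-flip masks in (size, lexicographic) order, B derives the single candidate mask per key of counter2 that could map the first key there (flipping a character always changes it, so the mask is the set of disagreeing positions), sorts these <= n candidates by (size, lexicographic) and verifies only them, returning the first that transforms the whole multiset.
-- outside the precondition, e.g. on find_transformation({'10': 1, '0': 1}, {'00': 1, '1': 1}): A returns (0,), B returns (0,)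
import Mathlib
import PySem

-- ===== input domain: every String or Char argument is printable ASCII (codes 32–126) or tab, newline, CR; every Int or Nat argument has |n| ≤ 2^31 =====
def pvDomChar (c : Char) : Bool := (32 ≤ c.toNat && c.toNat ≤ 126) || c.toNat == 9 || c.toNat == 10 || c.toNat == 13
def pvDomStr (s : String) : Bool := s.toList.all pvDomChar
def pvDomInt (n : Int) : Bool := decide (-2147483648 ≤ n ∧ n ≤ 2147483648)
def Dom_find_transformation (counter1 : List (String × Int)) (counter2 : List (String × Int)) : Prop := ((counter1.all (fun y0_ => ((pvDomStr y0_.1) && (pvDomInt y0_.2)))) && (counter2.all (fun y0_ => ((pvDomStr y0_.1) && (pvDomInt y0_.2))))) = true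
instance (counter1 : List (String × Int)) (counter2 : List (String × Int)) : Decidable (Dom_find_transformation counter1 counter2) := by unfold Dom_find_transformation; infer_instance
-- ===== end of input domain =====

-- B replaces A's exhaustive search over all 2^L - 1 bit-flip masks by deriving one candidate
-- mask per key of counter2 (a mask is determined by where it sends the first key) and
-- verifying only those candidates, in the same (size, lexicographic) order. Objective: faster.

-- ===== PORT A =====
-- helpers shared with port B (both Pythons flip characters the same way and both compare
-- Counter(...) == counter2, i.e. Python dict equality: same size and same value per key;
-- counter1/counter2 are Python dicts: first binding of a key wins, lookup is first match)
def pyFlip (c : Char) : Char := if c = '0' then '1' else '0'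

def dictKeys (l : List (String × Int)) : List String := PySem.List.dedup (l.map (·.1))

def dictGet? (l : List (String × Int)) (k : String) : Option Int :=
  (l.find? (fun p => p.1 == k)).map (·.2)

def counterEqDict (xs : List String) (c2 : List (String × Int)) : Bool :=
  let cnt := PySem.Dict.counter xs
  cnt.size == (dictKeys c2).length && cnt.items.all (fun kv => dictGet? c2 kv.1 == some kv.2)

-- bit_list = list(s); bit_list[n] = flipped; ''.join(bit_list).
-- n always comes from range(bit_length), so 0 ≤ n; the IndexError case (pyGet? = none,
-- reachable only through a key shorter than the first) is excluded by Pre_, no-op here.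
def flipChars (cs : List Char) (n : Int) : List Char :=
  match PySem.List.pyGet? cs n with
  | some c => cs.set n.toNat (pyFlip c)
  | none => cs

def flip_bit_string (s : String) (n : Int) : String := String.ofList (flipChars s.toList n)

def flip_multiple_bits (s : String) (positions : List Int) : String :=
  positions.foldl flip_bit_string s

-- for r in range(1, bit_length + 1): for positions in combinations(range(bit_length), r):
--   if Counter([flip_multiple_bits(b, positions) for b in counter1]) == counter2: return positions
-- (next(iter(counter1)) on an empty dict raises StopIteration: excluded by Pre_)
def find_transformation (counter1 : List (String × Int)) (counter2 : List (String × Int)) : Option (List Int) :=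
  match dictKeys counter1 with
  | [] => none
  | k0 :: rest =>
    let L : Int := (k0.toList.length : Int)
    ((PySem.List.pyRange 1 (L + 1) 1).flatMap
        (fun r => PySem.List.combinations (PySem.List.pyRange 0 L 1) r.toNat)).find?
      (fun ps => counterEqDict ((k0 :: rest).map (fun b => flip_multiple_bits b ps)) counter2)

-- ===== PORT B =====
-- ''.join(flip(c) if i in posset else c for i, c in enumerate(k))
def applyMask (k : String) (ps : List Int) : String :=
  String.ofList ((PySem.List.enumerate k.toList).map
    (fun ic => if ps.contains ic.1 then pyFlip ic.2 else ic.2))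

-- the one candidate mask that could send rep to t: the positions where they disagree
-- (Source B checks len(t) == L before indexing, so the comprehension's indexing is in range)
def candMask (rep : String) (L : Int) (t : String) : Option (List Int) :=
  if (t.toList.length : Int) = L then
    let m := (PySem.List.pyRange 0 L 1).filter
      (fun i => !(PySem.List.pyGetD rep.toList i ' ' == PySem.List.pyGetD t.toList i ' '))
    if !m.isEmpty && m.all
        (fun i => pyFlip (PySem.List.pyGetD rep.toList i ' ') == PySem.List.pyGetD t.toList i ' ')
      then some m else none
  else none

-- (keys1[0] on an empty dict raises IndexError: excluded by Pre_)
def find_transformation_alt (counter1 : List (String × Int)) (counter2 : List (String × Int)) : Option (List Int) :=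
  match dictKeys counter1 with
  | [] => none
  | rep :: rest =>
    let L : Int := (rep.toList.length : Int)
    let cands := (dictKeys counter2).filterMap (candMask rep L)
    -- candidates.sort(key=lambda m: (len(m),) + m)
    (PySem.List.sorted cands (fun m => ((m.length : Int) :: m : List Int))).find?
      (fun ps => counterEqDict ((rep :: rest).map (fun k => applyMask k ps)) counter2)

-- ===== PRECONDITION & SPEC =====
-- Pre_ excludes the empty counter1, on which A raises StopIteration (B: IndexError), and
-- counter1 containing a key shorter than its first key, on which A's search raises
-- IndexError inside flip_bit_string unless a matching mask happens to be found first.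
def Pre_find_transformation (counter1 : List (String × Int)) (counter2 : List (String × Int)) : Prop :=
  counter1 ≠ [] ∧ ∀ p ∈ counter1, (counter1.headD ("", 0)).1.toList.length ≤ p.1.toList.length

instance (counter1 : List (String × Int)) (counter2 : List (String × Int)) : Decidable (Pre_find_transformation counter1 counter2) := by
  unfold Pre_find_transformation; infer_instance

def pvWitness_find_transformation : (List (String × Int)) × (List (String × Int)) :=
  ([("01", 1), ("10", 1)], [("10", 1), ("01", 1)])

def Spec_find_transformation (counter1 : List (String × Int)) (counter2 : List (String × Int)) (out : Option (List Int)) : Prop := out = find_transformation_alt counter1 counter2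
instance (counter1 : List (String × Int)) (counter2 : List (String × Int)) (out : Option (List Int)) : Decidable (Spec_find_transformation counter1 counter2 out) := by unfold Spec_find_transformation; infer_instance

-- ===== CLAIM (what is proved, stated in full; the proofs are below) =====
def Claim_equal_find_transformation : Prop := ∀ (counter1 : List (String × Int)) (counter2 : List (String × Int)), Dom_find_transformation counter1 counter2 → Pre_find_transformation counter1 counter2 → Spec_find_transformation counter1 counter2 (find_transformation counter1 counter2)

-- ===== LEMMAS AND PROOFS =====

theorem pyFlip_ne (c : Char) : pyFlip c ≠ c := by
  unfold pyFlip
  split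
  · rename_i h; rw [h]; decide
  · rename_i h; exact fun he => h he.symm

theorem length_foldl_flipChars (ps : List Int) (l : List Char) :
    (ps.foldl flipChars l).length = l.length := by
  induction ps generalizing l with
  | nil => rfl
  | cons p ps ih =>
    rw [List.foldl_cons, ih]
    unfold flipChars
    cases PySem.List.pyGet? l p <;> simp

theorem toList_flip_multiple_bits (ps : List Int) (s : String) :
    (flip_multiple_bits s ps).toList = ps.foldl flipChars s.toList := by
  induction ps generalizing s with
  | nil => rfl
  | cons p ps ih =>
    show (flip_multiple_bits (flip_bit_string s p) ps).toList = _
    rw [ih, List.foldl_cons, flip_bit_string, String.toList_ofList]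

theorem getElem?_foldl_flipChars (ps : List Int) (l : List Char)
    (hnd : ps.Nodup) (hnn : ∀ i ∈ ps, 0 ≤ i) (i : Nat) (hi : i < l.length) :
    (ps.foldl flipChars l)[i]? =
      some (if (i : Int) ∈ ps then pyFlip l[i] else l[i]) := by
  induction ps generalizing l with
  | nil => simp [List.getElem?_eq_getElem hi]
  | cons p ps ih =>
    have hp0 : 0 ≤ p := hnn p (List.mem_cons_self ..)
    obtain ⟨q, rfl⟩ : ∃ q : Nat, p = (q : Int) := ⟨p.toNat, (Int.toNat_of_nonneg hp0).symm⟩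
    have hlen : (flipChars l q).length = l.length := by
      unfold flipChars; cases PySem.List.pyGet? l (q : Int) <;> simp
    have h2 : i < (flipChars l (q:Int)).length := by rw [hlen]; exact hi
    rw [List.foldl_cons,
      ih (flipChars l (q:Int)) hnd.of_cons (fun j hj => hnn j (List.mem_cons_of_mem _ hj)) h2]
    have hget : (flipChars l (q:Int))[i]'h2 = if q = i ∧ q < l.length then pyFlip l[i] else l[i] := by
      rcases hq : PySem.List.pyGet? l (q : Int) with _ | c <;>
        rw [PySem.List.pyGet?_natCast] at hq
      · have hnlt : ¬ q < l.length := by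
          intro hlt; rw [List.getElem?_eq_getElem hlt] at hq; exact absurd hq (by simp)
        have hfc : flipChars l (q:Int) = l := by
          simp [flipChars, PySem.List.pyGet?_natCast, hq]
        simp only [hfc]
        simp [hnlt]
      · have hqlt : q < l.length := by
          by_contra hlt
          rw [List.getElem?_eq_none_iff.mpr (by omega)] at hq; exact absurd hq (by simp)
        rw [List.getElem?_eq_getElem hqlt] at hq
        rcases Option.some.inj hq with rfl
        simp only [flipChars, PySem.List.pyGet?_natCast, List.getElem?_eq_getElem hqlt]
        rw [List.getElem_set]
        simp only [Int.toNat_natCast, hqlt, and_true]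
        split
        · rename_i h; subst h; rfl
        · rfl
    simp only [hget]
    by_cases hqi : q = i
    · subst hqi
      have hnotin : ((q : Int)) ∉ ps := (List.nodup_cons.mp hnd).1
      simp [hnotin, hi, List.mem_cons]
    · have hne : ¬ ((i : Int) = (q : Int)) := fun h => hqi (by exact_mod_cast h.symm)
      have hqi2 : ¬ (q = i ∧ q < l.length) := fun h => hqi h.1
      simp [List.mem_cons, hne, hqi2]

theorem flip_eq_applyMask (b : String) (ps : List Int)
    (hnd : ps.Nodup) (hnn : ∀ i ∈ ps, 0 ≤ i) :
    flip_multiple_bits b ps = applyMask b ps := by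
  have h : (flip_multiple_bits b ps).toList = (applyMask b ps).toList := by
    rw [toList_flip_multiple_bits]
    unfold applyMask
    rw [String.toList_ofList]
    apply List.ext_getElem?
    intro i
    by_cases hi : i < b.toList.length
    · rw [getElem?_foldl_flipChars ps b.toList hnd hnn i hi]
      have hi2 : i < ((PySem.List.enumerate b.toList).map
          (fun ic => if ps.contains ic.1 then pyFlip ic.2 else ic.2)).length := by
        rw [List.length_map, PySem.List.length_enumerate]; exact hi
      rw [List.getElem?_eq_getElem hi2]
      congr 1
      rw [List.getElem_map, PySem.List.getElem_enumerate]
      simp [List.contains_eq_mem]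
    · rw [List.getElem?_eq_none_iff.mpr (by rw [length_foldl_flipChars]; omega),
        List.getElem?_eq_none_iff.mpr (by rw [List.length_map, PySem.List.length_enumerate]; omega)]
  calc flip_multiple_bits b ps
      = String.ofList (flip_multiple_bits b ps).toList := String.ofList_toList.symm
    _ = String.ofList (applyMask b ps).toList := by rw [h]
    _ = applyMask b ps := String.ofList_toList

theorem combos_pairwise (xs : List Int) (hx : xs.Pairwise (· < ·)) (n : Nat) :
    (PySem.List.combinations xs n).Pairwise (· < ·) := by
  induction xs generalizing n with
  | nil =>
    cases n with
    | zero => rw [PySem.List.combinations_zero]; exact List.pairwise_singleton ..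
    | succ m => rw [PySem.List.combinations_nil_succ]; exact List.Pairwise.nil
  | cons x xs ih =>
    cases n with
    | zero => rw [PySem.List.combinations_zero]; exact List.pairwise_singleton ..
    | succ m =>
      rw [PySem.List.combinations_cons_succ]
      rw [List.pairwise_append]
      refine ⟨?_, ih hx.of_cons (m+1), ?_⟩
      · rw [List.pairwise_map]
        exact (ih hx.of_cons m).imp (fun h => List.cons_lt_cons_iff.mpr (Or.inr ⟨rfl, h⟩))
      · intro a ha b hb
        rcases List.mem_map.mp ha with ⟨a', _, rfl⟩
        rcases (PySem.List.mem_combinations_iff ..).mp hb with ⟨hsub, hlen⟩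
        cases b with
        | nil => simp at hlen
        | cons y b' =>
          have hy : y ∈ xs := hsub.mem (List.mem_cons_self ..)
          exact List.cons_lt_cons_iff.mpr (Or.inl (List.rel_of_pairwise_cons hx hy))

theorem filter_mem_of_sublist {S l : List Int} (h : S.Sublist l) (hnd : l.Nodup) :
    l.filter (fun a => decide (a ∈ S)) = S := by
  induction h with
  | slnil => rfl
  | @cons S' l' a h ih =>
    have ha : a ∉ l' := (List.nodup_cons.mp hnd).1
    have haS : a ∉ S' := fun hm => ha (h.mem hm)
    rw [List.filter_cons]
    simp only [haS, decide_false, Bool.false_eq_true, if_false]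
    exact ih (List.nodup_cons.mp hnd).2
  | @cons₂ S' l' a h ih =>
    have ha : a ∉ l' := (List.nodup_cons.mp hnd).1
    rw [List.filter_cons]
    simp only [List.mem_cons, true_or, decide_true, if_true]
    congr 1
    have hcg : List.filter (fun x => decide (x = a ∨ x ∈ S')) l'
        = List.filter (fun x => decide (x ∈ S')) l' :=
      List.filter_congr (fun x hx => by
        have hxa : x ≠ a := fun he => ha (he ▸ hx)
        simp [hxa])
    rw [hcg]
    exact ih (List.nodup_cons.mp hnd).2

theorem candMask_eq_some {rep t : String} {L : Int} {m : List Int} :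
    candMask rep L t = some m ↔
      (t.toList.length : Int) = L ∧
      m = (PySem.List.pyRange 0 L 1).filter
        (fun i => !(PySem.List.pyGetD rep.toList i ' ' == PySem.List.pyGetD t.toList i ' ')) ∧
      (!m.isEmpty && m.all (fun i => pyFlip (PySem.List.pyGetD rep.toList i ' ') == PySem.List.pyGetD t.toList i ' ')) = true := by
  unfold candMask
  split
  · rename_i hlen
    dsimp only
    split
    · rename_i hcond
      constructor
      · rintro h; rcases Option.some.inj h with rfl; exact ⟨hlen, rfl, hcond⟩
      · rintro ⟨-, rfl, -⟩; rfl
    · rename_i hcond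
      constructor
      · rintro ⟨⟩
      · rintro ⟨-, rfl, hc⟩; exact absurd hc hcond
  · rename_i hlen
    constructor
    · rintro ⟨⟩
    · rintro ⟨h1, -, -⟩; exact absurd h1 hlen

-- pyGetD at a nonnegative in-range index is getElem
theorem pyGetD_getElem (l : List Char) (q : Nat) (hq : q < l.length) :
    PySem.List.pyGetD l (q : Int) ' ' = l[q] := by
  rw [PySem.List.pyGetD_natCast, List.getD_eq_getElem?_getD, List.getElem?_eq_getElem hq]
  rfl

theorem candMask_of_flip (rep : String) {x : List Int}
    (hx : x.Sublist (PySem.List.pyRange 0 ((rep.toList.length : Int)) 1)) (hne : x ≠ []) :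
    candMask rep (rep.toList.length : Int) (flip_multiple_bits rep x) = some x := by
  set R := rep.toList with hR
  set L : Int := (R.length : Int) with hLdef
  have hnd : x.Nodup := hx.nodup (PySem.List.nodup_pyRange_one 0 L)
  have hnn : ∀ i ∈ x, 0 ≤ i := fun i hi => (PySem.List.mem_pyRange_one.mp (hx.mem hi)).1
  have htl : (flip_multiple_bits rep x).toList = x.foldl flipChars R := toList_flip_multiple_bits x rep
  have hlen : (flip_multiple_bits rep x).toList.length = R.length := by
    rw [htl]; exact length_foldl_flipChars x R
  have hchar : ∀ (q : Nat) (hq : q < R.length),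
      (flip_multiple_bits rep x).toList[q]'(by rw [hlen]; exact hq)
        = if (q : Int) ∈ x then pyFlip R[q] else R[q] := by
    intro q hq
    have := getElem?_foldl_flipChars x R hnd hnn q hq
    rw [← htl] at this
    rw [List.getElem?_eq_getElem (by rw [hlen]; exact hq)] at this
    exact Option.some.inj this
  apply candMask_eq_some.mpr
  refine ⟨by rw [hlen], ?_, ?_⟩
  · -- the disagreement filter recovers exactly x
    have hcg : (PySem.List.pyRange 0 L 1).filter
        (fun i => !(PySem.List.pyGetD R i ' ' == PySem.List.pyGetD (flip_multiple_bits rep x).toList i ' '))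
        = (PySem.List.pyRange 0 L 1).filter (fun a => decide (a ∈ x)) := by
      apply List.filter_congr
      intro i hi
      rcases PySem.List.mem_pyRange_one.mp hi with ⟨h0, hiL⟩
      obtain ⟨q, rfl⟩ : ∃ q : Nat, i = (q : Int) := ⟨i.toNat, (Int.toNat_of_nonneg h0).symm⟩
      have hq : q < R.length := by rw [hLdef] at hiL; exact_mod_cast hiL
      rw [pyGetD_getElem R q hq, pyGetD_getElem _ q (by rw [hlen]; exact hq), hchar q hq]
      by_cases hmem : (q : Int) ∈ x
      · simp [hmem, (pyFlip_ne R[q]).symm]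
      · simp [hmem]
    rw [hcg, filter_mem_of_sublist hx (PySem.List.nodup_pyRange_one 0 L)]
  · rw [Bool.and_eq_true]
    constructor
    · simp [hne]
    · rw [List.all_eq_true]
      intro i hi
      have h0 : 0 ≤ i := hnn i hi
      obtain ⟨q, rfl⟩ : ∃ q : Nat, i = (q : Int) := ⟨i.toNat, (Int.toNat_of_nonneg h0).symm⟩
      have hq : q < R.length := by
        have h2 := (PySem.List.mem_pyRange_one.mp (hx.mem hi)).2
        rw [hLdef] at h2; exact_mod_cast h2
      rw [pyGetD_getElem R q hq, pyGetD_getElem _ q (by rw [hlen]; exact hq), hchar q hq]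
      simp [hi]

theorem candMask_char_of_some {rep t : String} {m : List Int}
    (h : candMask rep ((rep.toList.length : Int)) t = some m) :
    t.toList.length = rep.toList.length ∧
    ∀ (q : Nat) (hq : q < rep.toList.length),
      t.toList[q]? = some (if (q : Int) ∈ m then pyFlip (rep.toList[q]'hq) else rep.toList[q]'hq) := by
  rcases candMask_eq_some.mp h with ⟨hlen, hm, hcond⟩
  have hlen' : t.toList.length = rep.toList.length := by exact_mod_cast hlen
  refine ⟨hlen', ?_⟩
  intro q hq
  rw [List.getElem?_eq_getElem (show q < t.toList.length by rw [hlen']; exact hq)]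
  congr 1
  rw [Bool.and_eq_true, List.all_eq_true] at hcond
  by_cases hmem : (q : Int) ∈ m
  · have := hcond.2 _ hmem
    rw [pyGetD_getElem _ q hq, pyGetD_getElem _ q (by rw [hlen']; exact hq)] at this
    have := eq_of_beq this
    simp only [hmem, if_true]
    exact this.symm
  · have hqr : (q : Int) ∈ PySem.List.pyRange 0 ((rep.toList.length : Int)) 1 :=
      PySem.List.mem_pyRange_one.mpr ⟨by omega, by exact_mod_cast hq⟩
    have ha : PySem.List.pyGetD rep.toList (q:Int) ' ' = rep.toList[q] := pyGetD_getElem _ q hq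
    have hb' : PySem.List.pyGetD t.toList (q:Int) ' '
        = t.toList[q]'(by rw [hlen']; exact hq) := pyGetD_getElem _ q (by rw [hlen']; exact hq)
    cases hbeq : (PySem.List.pyGetD rep.toList (q:Int) ' ' == PySem.List.pyGetD t.toList (q:Int) ' ') with
    | false =>
      have : (q : Int) ∈ m := by
        rw [hm]
        exact List.mem_filter.mpr ⟨hqr, by rw [hbeq]; rfl⟩
      exact absurd this hmem
    | true =>
      have heq := eq_of_beq hbeq
      rw [ha, hb'] at heq
      simp only [hmem, if_false]
      exact heq.symm

theorem candMask_inj (rep : String) {t₁ t₂ : String} {m : List Int}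
    (h₁ : candMask rep ((rep.toList.length : Int)) t₁ = some m)
    (h₂ : candMask rep ((rep.toList.length : Int)) t₂ = some m) : t₁ = t₂ := by
  rcases candMask_char_of_some h₁ with ⟨hl1, hc1⟩
  rcases candMask_char_of_some h₂ with ⟨hl2, hc2⟩
  have : t₁.toList = t₂.toList := by
    apply List.ext_getElem?
    intro q
    by_cases hq : q < rep.toList.length
    · rw [hc1 q hq, hc2 q hq]
    · rw [List.getElem?_eq_none_iff.mpr (by omega), List.getElem?_eq_none_iff.mpr (by omega)]
  calc t₁ = String.ofList t₁.toList := String.ofList_toList.symm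
    _ = String.ofList t₂.toList := by rw [this]
    _ = t₂ := String.ofList_toList

theorem candMask_shape {rep t : String} {L : Int} {m : List Int}
    (h : candMask rep L t = some m) :
    m.Sublist (PySem.List.pyRange 0 L 1) ∧ m ≠ [] := by
  rcases candMask_eq_some.mp h with ⟨-, hm, hcond⟩
  rw [Bool.and_eq_true] at hcond
  refine ⟨by rw [hm]; exact List.filter_sublist, ?_⟩
  intro hnil
  rw [hnil] at hcond
  simp at hcond

theorem mem_keys2_of_counterEq {xs : List String} {c2 : List (String × Int)} {y : String}
    (h : counterEqDict xs c2 = true) (hy : y ∈ xs) : y ∈ dictKeys c2 := by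
  unfold counterEqDict at h
  rw [Bool.and_eq_true, List.all_eq_true] at h
  have hmem : (y, ((xs.count y : Int))) ∈ (PySem.Dict.counter xs).items := by
    rw [PySem.Dict.items_counter]
    exact List.mem_map.mpr ⟨y, (PySem.Set.mem_ofList xs y).mpr hy, rfl⟩
  have h2 := h.2 _ hmem
  rw [beq_iff_eq] at h2
  unfold dictGet? at h2
  rcases hf : c2.find? (fun p => p.1 == y) with _ | pr
  · rw [hf] at h2; simp at h2
  · have hb := List.find?_some hf
    have hp1 : pr.1 = y := eq_of_beq hb
    have hpm : pr ∈ c2 := List.mem_of_find?_eq_some hf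
    unfold dictKeys
    rw [PySem.List.mem_dedup]
    exact List.mem_map.mpr ⟨pr, hpm, hp1⟩

-- the heart of the proof: with the first key k0 fixed, A's exhaustive ordered search and
-- B's sorted candidate search find the same first hit
theorem core_eq (k0 : String) (rest : List String) (c2 : List (String × Int)) :
    ((PySem.List.pyRange 1 ((k0.toList.length : Int) + 1) 1).flatMap
        (fun r => PySem.List.combinations (PySem.List.pyRange 0 ((k0.toList.length : Int)) 1) r.toNat)).find?
      (fun ps => counterEqDict ((k0 :: rest).map (fun b => flip_multiple_bits b ps)) c2)
    = (PySem.List.sorted ((dictKeys c2).filterMap (candMask k0 ((k0.toList.length : Int))))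
        (fun m => ((m.length : Int) :: m : List Int))).find?
      (fun ps => counterEqDict ((k0 :: rest).map (fun k => applyMask k ps)) c2) := by
  set L : Int := ((k0.toList.length : Int)) with hLdef
  set P : List Int → Bool := fun ps =>
    counterEqDict ((k0 :: rest).map (fun b => flip_multiple_bits b ps)) c2 with hP
  set P' : List Int → Bool := fun ps =>
    counterEqDict ((k0 :: rest).map (fun k => applyMask k ps)) c2 with hP'
  set E : List (List Int) := (PySem.List.pyRange 1 (L + 1) 1).flatMap
    (fun r => PySem.List.combinations (PySem.List.pyRange 0 L 1) r.toNat) with hE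
  set cands : List (List Int) := (dictKeys c2).filterMap (candMask k0 L) with hcands
  set key : List Int → List Int := fun m => ((m.length : Int) :: m) with hkey
  set Cs : List (List Int) := PySem.List.sorted cands key with hCs
  -- P and P' agree on every mask drawn from range(L)
  have hPP' : ∀ x : List Int, x.Sublist (PySem.List.pyRange 0 L 1) → P x = P' x := by
    intro x hs
    have hnd : x.Nodup := hs.nodup (PySem.List.nodup_pyRange_one 0 L)
    have hnn : ∀ i ∈ x, 0 ≤ i := fun i hi => (PySem.List.mem_pyRange_one.mp (hs.mem hi)).1
    rw [hP, hP']
    dsimp only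
    congr 1
    exact List.map_congr_left (fun b _ => flip_eq_applyMask b x hnd hnn)
  -- E is strictly increasing in the (length, lexicographic) key
  have hEpw : E.Pairwise (fun a b => key a < key b) := by
    rw [hE]
    apply List.pairwise_flatMap.mpr
    constructor
    · intro r _
      apply List.Pairwise.imp_of_mem ?_
        (combos_pairwise _ (PySem.List.pairwise_lt_pyRange_one 0 L) r.toNat)
      intro a b ha hb hab
      have hla := PySem.List.length_of_mem_combinations ha
      have hlb := PySem.List.length_of_mem_combinations hb
      exact List.cons_lt_cons_iff.mpr (Or.inr ⟨by rw [hla, hlb], hab⟩)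
    · apply List.Pairwise.imp_of_mem ?_ (PySem.List.pairwise_lt_pyRange_one 1 (L + 1))
      intro r₁ r₂ h₁ h₂ hlt x hx y hy
      have hx1 := PySem.List.length_of_mem_combinations hx
      have hy1 := PySem.List.length_of_mem_combinations hy
      have hr1 : 1 ≤ r₁ := (PySem.List.mem_pyRange_one.mp h₁).1
      apply List.cons_lt_cons_iff.mpr
      left
      rw [hx1, hy1]
      omega
  have hEnd : E.Nodup := hEpw.imp (fun {a b} hlt he => by subst he; exact absurd hlt (lt_irrefl _))
  -- membership facts about candidates
  have hsubCs : ∀ x ∈ Cs, x.Sublist (PySem.List.pyRange 0 L 1) ∧ x ≠ [] := by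
    intro x hx
    rcases List.mem_filterMap.mp ((PySem.List.mem_sorted ..).mp hx) with ⟨t, _, hcm⟩
    exact candMask_shape hcm
  have hCnd : cands.Nodup := by
    rw [hcands]
    exact List.Nodup.filterMap
      (fun t₁ t₂ m hm₁ hm₂ => candMask_inj k0 hm₁ hm₂) (PySem.List.nodup_dedup _)
  have hCsNd : Cs.Nodup := (PySem.List.sorted_perm cands key false).symm.nodup hCnd
  -- the crucial set equality: the masks that pass the test are the same on both sides
  have hmemiff : ∀ x, x ∈ E.filter P ↔ x ∈ Cs.filter P' := by
    intro x
    constructor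
    · intro hxm
      rcases List.mem_filter.mp hxm with ⟨hxE, hPx⟩
      rcases List.mem_flatMap.mp hxE with ⟨r, hr, hxc⟩
      rcases (PySem.List.mem_combinations_iff ..).mp hxc with ⟨hsub, hlen⟩
      have hr1 : 1 ≤ r := (PySem.List.mem_pyRange_one.mp hr).1
      have hne : x ≠ [] := by
        intro hnil
        rw [hnil] at hlen
        simp only [List.length_nil] at hlen
        omega
      have hcm : candMask k0 L (flip_multiple_bits k0 x) = some x := candMask_of_flip k0 hsub hne
      have ht2 : flip_multiple_bits k0 x ∈ dictKeys c2 :=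
        mem_keys2_of_counterEq hPx
          (List.mem_map.mpr ⟨k0, List.mem_cons_self .., rfl⟩)
      refine List.mem_filter.mpr ⟨?_, by rw [← hPP' x hsub]; exact hPx⟩
      rw [hCs, PySem.List.mem_sorted, hcands]
      exact List.mem_filterMap.mpr ⟨_, ht2, hcm⟩
    · intro hxm
      rcases List.mem_filter.mp hxm with ⟨hxCs, hP'x⟩
      rcases hsubCs x hxCs with ⟨hsub, hne⟩
      have hlenle : x.length ≤ L.toNat := by
        have h1 := hsub.length_le
        rw [PySem.List.length_pyRange_one] at h1
        omega
      have hlenpos : 0 < x.length := List.length_pos_iff.mpr hne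
      refine List.mem_filter.mpr ⟨?_, by rw [hPP' x hsub]; exact hP'x⟩
      apply List.mem_flatMap.mpr
      refine ⟨(x.length : Int), PySem.List.mem_pyRange_one.mpr ⟨by omega, by omega⟩, ?_⟩
      apply (PySem.List.mem_combinations_iff ..).mpr
      exact ⟨hsub, by simp⟩
  -- assemble: both finds are the head of the same filtered list
  rw [← List.head?_filter, ← List.head?_filter]
  congr 1
  apply PySem.List.eq_of_perm_of_pairwise_le_of_injective key
  · intro a b h
    simpa using congrArg List.tail h
  · exact (List.perm_ext_iff_of_nodup (hEnd.filter P) (hCsNd.filter P')).mpr hmemiff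
  · exact (List.Pairwise.sublist List.filter_sublist hEpw).imp le_of_lt
  · rw [hCs]
    refine List.Pairwise.sublist List.filter_sublist ?_
    have hsp := PySem.List.sorted_pairwise cands key
    convert hsp using 2

-- ===== VERDICT (by name: the statement is the Claim_ definition above) =====
theorem find_transformation_spec : Claim_equal_find_transformation := by
  unfold Claim_equal_find_transformation
  intro c1 c2 _ _
  unfold Spec_find_transformation find_transformation find_transformation_alt
  cases hk : dictKeys c1 with
  | nil => rfl
  | cons k0 rest => exact core_eq k0 rest c2
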